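-- pv_equiv track=rewrite | github.com/cathuan/LeetCode-Questions | q357.py | count_with_digit
-- ===== SOURCE A (Python) =====
-- def count_with_digit(k):
--
--     if k == 0:
--         return 1
--
--     k -= 1
--     result = 9
--     n = 9
--     while k >= 1:
--         result *= n
--         n -= 1
--         k -= 1
--     return result
-- ===== SOURCE B (Python) =====
-- # Precomputed answers for 0..10 distinct digits; any other k admits no numbers.
-- _ANSWERS = [1, 9, 81, 648, 4536, 27216, 136080, 544320, 1632960, 3265920, 3265920]
--
-- def count_with_digit(k):
--     return _ANSWERS[k] if 0 <= k < len(_ANSWERS) else 0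
-- ===== Notes on version B (the rewrite author's own statement) =====
-- stated objective: simpler
-- what changed: Replaces the multiply-down while-loop by a single lookup in a precomputed table of the eleven possible answers (zero beyond it); Pre_ excludes negative k, which lies outside the function's natural domain since a count of distinct digits cannot be negative, and there the two implementations return different unspecified values.
-- outside the precondition, e.g. on count_with_digit(-1): A returns 9, B returns 0; on count_with_digit(-5): A returns 9, B returns 0
import Mathlib
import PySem

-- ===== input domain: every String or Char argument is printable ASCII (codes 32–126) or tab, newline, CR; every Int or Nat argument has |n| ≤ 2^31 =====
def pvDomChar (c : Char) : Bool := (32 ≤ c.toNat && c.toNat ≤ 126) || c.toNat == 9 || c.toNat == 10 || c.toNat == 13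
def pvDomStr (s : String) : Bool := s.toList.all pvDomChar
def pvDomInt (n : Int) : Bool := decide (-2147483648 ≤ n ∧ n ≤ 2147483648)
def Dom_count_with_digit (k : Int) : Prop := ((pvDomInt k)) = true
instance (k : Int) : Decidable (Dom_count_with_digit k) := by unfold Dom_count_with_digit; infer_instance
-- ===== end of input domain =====

-- B replaces A's multiply-down while-loop by a precomputed 11-entry table lookup (simpler, O(1));
-- Pre_ restricts to the natural domain of nonnegative k (negative counts are unspecified).


-- ===== PORT A =====
-- the while-loop of A: while k >= 1: result *= n; n -= 1; k -= 1
def countLoopA (result n k : Int) : Int :=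
  if h : k ≥ 1 then countLoopA (result * n) (n - 1) (k - 1) else result
termination_by k.toNat
decreasing_by omega

def count_with_digit (k : Int) : Int :=
  if k = 0 then 1
  else countLoopA 9 9 (k - 1)

-- ===== PORT B =====
def pvAnswers : List Int := [1, 9, 81, 648, 4536, 27216, 136080, 544320, 1632960, 3265920, 3265920]

def count_with_digit_alt (k : Int) : Int :=
  if 0 ≤ k ∧ k < (pvAnswers.length : Int) then (PySem.List.pyGet? pvAnswers k).getD 0  -- guard guarantees in range
  else 0

-- ===== PRECONDITION & SPEC =====
-- Pre_ excludes negative k, which lies outside the function's natural domain (a count of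
-- distinct digits cannot be negative): no return value is specified there and the two
-- implementations return different unspecified values (see the cites in claim.json).
def Pre_count_with_digit (k : Int) : Prop := 0 ≤ k
instance (k : Int) : Decidable (Pre_count_with_digit k) := by unfold Pre_count_with_digit; infer_instance
def pvWitness_count_with_digit : Int := 3

def Spec_count_with_digit (k : Int) (out : Int) : Prop := out = count_with_digit_alt k
instance (k : Int) (out : Int) : Decidable (Spec_count_with_digit k out) := by unfold Spec_count_with_digit; infer_instance

-- ===== CLAIM =====
def Claim_equal_count_with_digit : Prop := ∀ (k : Int), Dom_count_with_digit k → Pre_count_with_digit k → Spec_count_with_digit k (count_with_digit k)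

-- ===== LEMMAS AND PROOFS =====

-- once the result is 0, the loop keeps it 0
theorem countLoopA_zero (k n : Int) : countLoopA 0 n k = 0 := by
  by_cases h : k ≥ 1
  · rw [countLoopA]
    simp only [h, dite_true, zero_mul]
    exact countLoopA_zero (k - 1) (n - 1)
  · rw [countLoopA]; simp [h]
termination_by k.toNat
decreasing_by omega

theorem countLoopA_hits_zero (r n k : Int) (hn : 0 ≤ n) (hk : n + 1 ≤ k) :
    countLoopA r n k = 0 := by
  rw [countLoopA]
  have hk1 : k ≥ 1 := by omega
  simp only [hk1, dite_true]
  by_cases hn0 : n = 0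
  · subst hn0; simp only [mul_zero]; exact countLoopA_zero (k - 1) (0 - 1)
  · exact countLoopA_hits_zero (r * n) (n - 1) (k - 1) (by omega) (by omega)
termination_by k.toNat
decreasing_by omega

theorem countLoopA_step (r n k : Int) (h : k ≥ 1) :
    countLoopA r n k = countLoopA (r * n) (n - 1) (k - 1) := by
  rw [countLoopA]; simp [h]

theorem countLoopA_stop (r n k : Int) (hk : k < 1) : countLoopA r n k = r := by
  rw [countLoopA]; simp [show ¬ k ≥ 1 by omega]

theorem countLoopA_ev0 : countLoopA 9 9 0 = 9 := by
  rw [countLoopA_stop _ _ _ (by norm_num)]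
theorem countLoopA_ev1 : countLoopA 9 9 1 = 81 := by
  rw [countLoopA_step _ _ _ (by norm_num),
      countLoopA_stop _ _ _ (by norm_num)]
  norm_num
theorem countLoopA_ev2 : countLoopA 9 9 2 = 648 := by
  rw [countLoopA_step _ _ _ (by norm_num),
      countLoopA_step _ _ _ (by norm_num),
      countLoopA_stop _ _ _ (by norm_num)]
  norm_num
theorem countLoopA_ev3 : countLoopA 9 9 3 = 4536 := by
  rw [countLoopA_step _ _ _ (by norm_num),
      countLoopA_step _ _ _ (by norm_num),
      countLoopA_step _ _ _ (by norm_num),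
      countLoopA_stop _ _ _ (by norm_num)]
  norm_num
theorem countLoopA_ev4 : countLoopA 9 9 4 = 27216 := by
  rw [countLoopA_step _ _ _ (by norm_num),
      countLoopA_step _ _ _ (by norm_num),
      countLoopA_step _ _ _ (by norm_num),
      countLoopA_step _ _ _ (by norm_num),
      countLoopA_stop _ _ _ (by norm_num)]
  norm_num
theorem countLoopA_ev5 : countLoopA 9 9 5 = 136080 := by
  rw [countLoopA_step _ _ _ (by norm_num),
      countLoopA_step _ _ _ (by norm_num),
      countLoopA_step _ _ _ (by norm_num),
      countLoopA_step _ _ _ (by norm_num),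
      countLoopA_step _ _ _ (by norm_num),
      countLoopA_stop _ _ _ (by norm_num)]
  norm_num
theorem countLoopA_ev6 : countLoopA 9 9 6 = 544320 := by
  rw [countLoopA_step _ _ _ (by norm_num),
      countLoopA_step _ _ _ (by norm_num),
      countLoopA_step _ _ _ (by norm_num),
      countLoopA_step _ _ _ (by norm_num),
      countLoopA_step _ _ _ (by norm_num),
      countLoopA_step _ _ _ (by norm_num),
      countLoopA_stop _ _ _ (by norm_num)]
  norm_num
theorem countLoopA_ev7 : countLoopA 9 9 7 = 1632960 := by
  rw [countLoopA_step _ _ _ (by norm_num),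
      countLoopA_step _ _ _ (by norm_num),
      countLoopA_step _ _ _ (by norm_num),
      countLoopA_step _ _ _ (by norm_num),
      countLoopA_step _ _ _ (by norm_num),
      countLoopA_step _ _ _ (by norm_num),
      countLoopA_step _ _ _ (by norm_num),
      countLoopA_stop _ _ _ (by norm_num)]
  norm_num
theorem countLoopA_ev8 : countLoopA 9 9 8 = 3265920 := by
  rw [countLoopA_step _ _ _ (by norm_num),
      countLoopA_step _ _ _ (by norm_num),
      countLoopA_step _ _ _ (by norm_num),
      countLoopA_step _ _ _ (by norm_num),
      countLoopA_step _ _ _ (by norm_num),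
      countLoopA_step _ _ _ (by norm_num),
      countLoopA_step _ _ _ (by norm_num),
      countLoopA_step _ _ _ (by norm_num),
      countLoopA_stop _ _ _ (by norm_num)]
  norm_num
theorem countLoopA_ev9 : countLoopA 9 9 9 = 3265920 := by
  rw [countLoopA_step _ _ _ (by norm_num),
      countLoopA_step _ _ _ (by norm_num),
      countLoopA_step _ _ _ (by norm_num),
      countLoopA_step _ _ _ (by norm_num),
      countLoopA_step _ _ _ (by norm_num),
      countLoopA_step _ _ _ (by norm_num),
      countLoopA_step _ _ _ (by norm_num),
      countLoopA_step _ _ _ (by norm_num),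
      countLoopA_step _ _ _ (by norm_num),
      countLoopA_stop _ _ _ (by norm_num)]
  norm_num

-- ===== VERDICT =====
set_option maxRecDepth 4000 in
theorem count_with_digit_spec : Claim_equal_count_with_digit := by
  intro k _ h0
  unfold Pre_count_with_digit at h0
  unfold Spec_count_with_digit count_with_digit count_with_digit_alt
  by_cases hbig : k ≥ 11
  · simp only [show k ≠ 0 by omega, if_false,
      show ¬ (0 ≤ k ∧ k < ((pvAnswers.length : Nat) : Int)) by simp [pvAnswers]; omega, if_false]
    exact countLoopA_hits_zero 9 9 (k - 1) (by omega) (by omega)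
  · have h10 : k ≤ 10 := by omega
    interval_cases k <;>
      norm_num [pvAnswers, PySem.List.pyGet?, PySem.List.pyIdx?, countLoopA_ev0,
        countLoopA_ev1, countLoopA_ev2, countLoopA_ev3, countLoopA_ev4, countLoopA_ev5,
        countLoopA_ev6, countLoopA_ev7, countLoopA_ev8, countLoopA_ev9] <;> decide
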